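-- pv_equiv track=rewrite | github.com/abulimov/atom-language-haproxy | generate.py | get_data_from_fetches_layer5
-- ===== SOURCE A (Python) =====
-- def get_data_from_fetches_layer5(lines):
--     keywords = []
--     found_paragraph = False
--     started = False
--     for line in lines:
--         if line.startswith("7.3.4. Fetching samples at Layer 5"):
--             found_paragraph = True
--             continue
--         if line.startswith("7.3.5. Fetching samples from buffer contents"):
--             break
--         if found_paragraph:
--             if line.startswith("51d.all"):
--                 started = True
--         if started:
--             stripped = line.strip()
--             if stripped and not line.startswith(" "):
--                 keyword = stripped.split()[0] # split by space
--                 keywords.append(keyword.split('(')[0]) # split by opening parentheses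
--     return keywords
-- ===== SOURCE B (Python) =====
-- def get_data_from_fetches_layer5(lines):
--     # Boundary-index decomposition: truncate at the 7.3.5 marker, locate the
--     # 7.3.4 heading, locate the 51d.all line, then collect keywords in that region.
--     end = next((k for k, l in enumerate(lines)
--                 if l.startswith("7.3.5. Fetching samples from buffer contents")), len(lines))
--     region = lines[:end]
--     i = next((k for k, l in enumerate(region)
--               if l.startswith("7.3.4. Fetching samples at Layer 5")), None)
--     if i is None:
--         return []
--     tail = region[i + 1:]
--     j = next((k for k, l in enumerate(tail)
--               if l.startswith("51d.all")), None)
--     if j is None: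
--         return []
--     keywords = []
--     for line in tail[j:]:
--         if line.startswith("7.3.4. Fetching samples at Layer 5"):
--             continue
--         stripped = line.strip()
--         if stripped and not line.startswith(" "):
--             keywords.append(stripped.split()[0].split('(')[0])
--     return keywords
-- ===== Notes on version B (the rewrite author's own statement) =====
-- stated objective: alternative
-- what changed: Replaces A's single pass threading found/started boolean flags with a boundary-index decomposition: first truncate the list at the 7.3.5 marker, then find the 7.3.4 heading index, then the 51d.all index after it, and finally collect keywords over that bounded slice with a flag-free loop.
import Mathlib
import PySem

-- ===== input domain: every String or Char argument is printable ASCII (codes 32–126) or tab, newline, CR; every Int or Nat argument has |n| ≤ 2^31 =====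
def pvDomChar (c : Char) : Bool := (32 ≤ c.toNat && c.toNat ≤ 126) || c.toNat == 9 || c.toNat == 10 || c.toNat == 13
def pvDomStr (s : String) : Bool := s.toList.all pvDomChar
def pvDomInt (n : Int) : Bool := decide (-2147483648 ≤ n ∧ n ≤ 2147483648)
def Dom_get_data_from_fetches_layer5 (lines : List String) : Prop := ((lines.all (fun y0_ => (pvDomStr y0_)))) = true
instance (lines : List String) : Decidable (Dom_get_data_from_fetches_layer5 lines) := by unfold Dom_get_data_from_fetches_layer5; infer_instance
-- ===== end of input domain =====

-- B replaces A's flag-threading single pass by a boundary-index decomposition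
-- (truncate at 7.3.5, find 7.3.4, find 51d.all, collect over the bounded slice);
-- same cost, different structure. Equivalence is about the return value (no mutation).

-- shared literal tests and keyword extraction (identical expressions in both Pythons)
def pv734 (l : String) : Bool := PySem.Str.startswith l "7.3.4. Fetching samples at Layer 5"
def pv735 (l : String) : Bool := PySem.Str.startswith l "7.3.5. Fetching samples from buffer contents"
def pv51d (l : String) : Bool := PySem.Str.startswith l "51d.all"
-- stripped.split()[0].split('(')[0] (guards ensure stripped ≠ [], so split₀ is nonempty)
def pvKeyword (stripped : List Char) : String :=
  String.ofList ((PySem.Chars.splitOn ((PySem.Chars.split₀ stripped).headD []) "(".toList).headD [])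

-- ===== PORT A =====
def pvA_loop (keywords : List String) (found started : Bool) : List String → List String
  | [] => keywords
  | line :: rest =>
    if pv734 line then pvA_loop keywords true started rest
    else if pv735 line then keywords
    else
      let started' := if found && pv51d line then true else started
      if started' then
        let stripped := PySem.Chars.strip line.toList
        if stripped ≠ [] ∧ PySem.Str.startswith line " " = false then
          pvA_loop (keywords ++ [pvKeyword stripped]) found started' rest
        else pvA_loop keywords found started' rest
      else pvA_loop keywords found started' rest

def get_data_from_fetches_layer5 (lines : List String) : List String :=
  pvA_loop [] false false lines

-- ===== PORT B =====
def pvCollect : List String → List String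
  | [] => []
  | line :: rest =>
    if pv734 line then pvCollect rest
    else
      let stripped := PySem.Chars.strip line.toList
      if stripped ≠ [] ∧ PySem.Str.startswith line " " = false then
        pvKeyword stripped :: pvCollect rest
      else pvCollect rest

def get_data_from_fetches_layer5_alt (lines : List String) : List String :=
  let e := (lines.findIdx? pv735).getD lines.length
  let region := lines.take e
  match region.findIdx? pv734 with
  | none => []
  | some i =>
    let tail := region.drop (i + 1)
    match tail.findIdx? pv51d with
    | none => []
    | some j => pvCollect (tail.drop j)

-- ===== PRECONDITION & SPEC =====
def Spec_get_data_from_fetches_layer5 (lines : List String) (out : List String) : Prop := out = get_data_from_fetches_layer5_alt lines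
instance (lines : List String) (out : List String) : Decidable (Spec_get_data_from_fetches_layer5 lines out) := by unfold Spec_get_data_from_fetches_layer5; infer_instance

-- ===== CLAIM (what is proved, stated in full; the proofs are below) =====
def Claim_equal_get_data_from_fetches_layer5 : Prop := ∀ (lines : List String), Dom_get_data_from_fetches_layer5 lines → Spec_get_data_from_fetches_layer5 lines (get_data_from_fetches_layer5 lines)

-- ===== LEMMAS AND PROOFS =====

-- the truncation of xs at the first 7.3.5 line
def pvTrunc (xs : List String) : List String := xs.take ((xs.findIdx? pv735).getD xs.length)

-- the found-phase value of B (search 51d.all, then collect), used as induction invariant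
def pvFound (xs : List String) : List String :=
  match (pvTrunc xs).findIdx? pv51d with
  | none => []
  | some j => pvCollect ((pvTrunc xs).drop j)

theorem pv_prefix_excl {a b l : String} (hab : ¬ (a.toList <+: b.toList)) (hba : ¬ (b.toList <+: a.toList))
    (h : PySem.Str.startswith l a = true) : PySem.Str.startswith l b = false := by
  by_contra hb
  have hb' : PySem.Str.startswith l b = true := by
    cases hq : PySem.Str.startswith l b with
    | false => exact absurd hq hb
    | true => rfl
  have h1 : a.toList <+: l.toList := (PySem.Chars.startswith_iff _ _).mp (by simpa using h)
  have h2 : b.toList <+: l.toList := (PySem.Chars.startswith_iff _ _).mp (by simpa using hb')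
  rcases List.prefix_or_prefix_of_prefix h1 h2 with hc | hc
  · exact hab hc
  · exact hba hc

theorem pv734_not_735 {l : String} (h : pv734 l = true) : pv735 l = false :=
  pv_prefix_excl (by decide) (by decide) h

theorem pv734_not_51d {l : String} (h : pv734 l = true) : pv51d l = false :=
  pv_prefix_excl (by decide) (by decide) h

theorem pvTrunc_nil : pvTrunc [] = [] := rfl

theorem pvTrunc_cons {l : String} (rest : List String) (h : pv735 l = false) :
    pvTrunc (l :: rest) = l :: pvTrunc rest := by
  unfold pvTrunc
  rw [List.findIdx?_cons, h]
  cases hf : rest.findIdx? pv735 <;> simp [List.take_succ_cons]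

theorem pvTrunc_cons_735 {l : String} (rest : List String) (h : pv735 l = true) :
    pvTrunc (l :: rest) = [] := by
  unfold pvTrunc
  rw [List.findIdx?_cons, h]
  rfl

-- the accumulator of A's loop is a prefix of the result
theorem pvA_loop_acc (xs : List String) : ∀ (f s : Bool) (acc : List String),
    pvA_loop acc f s xs = acc ++ pvA_loop [] f s xs := by
  induction xs with
  | nil => intro f s acc; simp [pvA_loop]
  | cons l rest ih =>
    intro f s acc
    simp only [pvA_loop]
    by_cases h4 : pv734 l = true
    · rw [if_pos h4, if_pos h4, ih, ih]
    · rw [if_neg h4, if_neg h4]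
      by_cases h5 : pv735 l = true
      · rw [if_pos h5, if_pos h5]; simp
      · rw [if_neg h5, if_neg h5]
        by_cases hst : (if (f && pv51d l) = true then true else s) = true
        · rw [if_pos hst, if_pos hst]
          by_cases hc : (PySem.Chars.strip l.toList ≠ [] ∧ PySem.Str.startswith l " " = false)
          · rw [if_pos hc, if_pos hc, ih, ih]; simp; rw [ih f (f && pv51d l || s) [pvKeyword (PySem.Chars.strip l.toList)]]; simp
          · rw [if_neg hc, if_neg hc, ih, ih]
        · rw [if_neg hst, if_neg hst, ih, ih]

-- once started, A's loop is B's collection over the truncated remainder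
theorem pvA_started (xs : List String) : ∀ (f : Bool),
    pvA_loop [] f true xs = pvCollect (pvTrunc xs) := by
  induction xs with
  | nil => intro f; simp [pvA_loop, pvTrunc_nil, pvCollect]
  | cons l rest ih =>
    intro f
    by_cases h4 : pv734 l = true
    · rw [pvTrunc_cons rest (pv734_not_735 h4)]
      simp only [pvA_loop, pvCollect, h4, if_true]
      exact ih true
    · simp only [Bool.not_eq_true] at h4
      by_cases h5 : pv735 l = true
      · rw [pvTrunc_cons_735 rest h5]
        simp [pvA_loop, h4, h5, pvCollect]
      · simp only [Bool.not_eq_true] at h5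
        rw [pvTrunc_cons rest h5]
        simp only [pvA_loop, h4, h5, Bool.false_eq_true, if_false, pvCollect]
        have hs : (if f && pv51d l then true else true) = true := by
          cases (f && pv51d l) <;> rfl
        rw [hs]
        simp only [if_true]
        by_cases hc : (PySem.Chars.strip l.toList ≠ [] ∧ PySem.Str.startswith l " " = false)
        · simp only [hc]
          rw [pvA_loop_acc, ih f]
          simp
        · simp only [hc]
          exact ih f

-- after the 7.3.4 heading, A's loop is B's 51d.all-search phase
theorem pvA_found (xs : List String) : pvA_loop [] true false xs = pvFound xs := by
  induction xs with
  | nil => simp [pvA_loop, pvFound, pvTrunc_nil]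
  | cons l rest ih =>
    by_cases h4 : pv734 l = true
    · have h5 := pv734_not_735 h4
      have hd := pv734_not_51d h4
      simp only [pvA_loop, h4, if_true]
      rw [ih]
      unfold pvFound
      rw [pvTrunc_cons rest h5, List.findIdx?_cons, hd]
      cases hf : (pvTrunc rest).findIdx? pv51d with
      | none => simp
      | some j => simp [List.drop_succ_cons]
    · simp only [Bool.not_eq_true] at h4
      by_cases h5 : pv735 l = true
      · simp only [pvA_loop, h4, Bool.false_eq_true, if_false, h5, if_true]
        unfold pvFound
        rw [pvTrunc_cons_735 rest h5]
        rfl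
      · simp only [Bool.not_eq_true] at h5
        by_cases hd : pv51d l = true
        · simp only [pvA_loop, h4, h5, Bool.false_eq_true, if_false, hd, Bool.and_self, if_true]
          unfold pvFound
          rw [pvTrunc_cons rest h5, List.findIdx?_cons, hd]
          simp only [if_true, List.drop_zero]
          simp only [pvCollect, h4, Bool.false_eq_true, if_false]
          by_cases hc : (PySem.Chars.strip l.toList ≠ [] ∧ PySem.Str.startswith l " " = false)
          · simp only [hc]
            rw [pvA_loop_acc, pvA_started rest true]
            simp
          · simp only [hc]
            exact pvA_started rest true
        · simp only [Bool.not_eq_true] at hd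
          simp only [pvA_loop, h4, h5, hd, Bool.false_eq_true, Bool.and_false, if_false]
          rw [ih]
          unfold pvFound
          rw [pvTrunc_cons rest h5, List.findIdx?_cons, hd]
          cases hf : (pvTrunc rest).findIdx? pv51d with
          | none => simp
          | some j => simp [List.drop_succ_cons]

theorem pvAB (xs : List String) : pvA_loop [] false false xs = get_data_from_fetches_layer5_alt xs := by
  induction xs with
  | nil => rfl
  | cons l rest ih =>
    simp only [get_data_from_fetches_layer5_alt]
    by_cases h4 : pv734 l = true
    · have h5 := pv734_not_735 h4
      simp only [pvA_loop, h4, if_true]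
      rw [pvA_found]
      show pvFound rest = _
      have ht : (l :: rest).take (((l :: rest).findIdx? pv735).getD (l :: rest).length)
          = l :: pvTrunc rest := pvTrunc_cons rest h5
      rw [ht, List.findIdx?_cons, h4]
      simp only [if_true, List.drop_succ_cons, List.drop_zero]
      rfl
    · simp only [Bool.not_eq_true] at h4
      by_cases h5 : pv735 l = true
      · simp only [pvA_loop, h4, Bool.false_eq_true, if_false, h5, if_true]
        have ht : (l :: rest).take (((l :: rest).findIdx? pv735).getD (l :: rest).length)
            = ([] : List String) := pvTrunc_cons_735 rest h5
        rw [ht]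
        rfl
      · simp only [Bool.not_eq_true] at h5
        simp only [pvA_loop, h4, h5, Bool.false_eq_true, Bool.false_and, if_false]
        rw [ih]
        simp only [get_data_from_fetches_layer5_alt]
        have ht : (l :: rest).take (((l :: rest).findIdx? pv735).getD (l :: rest).length)
            = l :: pvTrunc rest := pvTrunc_cons rest h5
        rw [ht, List.findIdx?_cons, if_neg (by simp [h4]),
          show List.take ((List.findIdx? pv735 rest).getD rest.length) rest = pvTrunc rest from rfl]
        cases hf : (pvTrunc rest).findIdx? pv734 with
        | none => rfl
        | some i => simp only [Option.map_some, List.drop_succ_cons]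

-- ===== VERDICT (by name: the statement is the Claim_ definition above) =====
theorem get_data_from_fetches_layer5_spec : Claim_equal_get_data_from_fetches_layer5 := by
  intro lines _
  show get_data_from_fetches_layer5 lines = get_data_from_fetches_layer5_alt lines
  exact pvAB lines
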